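-- pv_equiv track=rewrite | github.com/Disi77/Advent-of-Code | AdventOfCode2020/day08/day08_part2.py | generate_data
-- ===== SOURCE A (Python) =====
-- def generate_data(instructions):
--     count_nop_jmp = sum([1 for x in instructions if x[:3] in ["nop", "jmp"]])
--     index = 0
--     temp = list(instructions)
--     for round in range(count_nop_jmp):
--         for i, item in enumerate(instructions):
--             if i >= index and item[:3] in ["nop", "jmp"]:
--                 break
--         temp_instructions = list(temp)
--         if "nop" in temp_instructions[i]:
--             temp_instructions[i] = "jmp" + temp_instructions[i][3:]
--         else:
--             temp_instructions[i] = "nop" + temp_instructions[i][3:]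
--         index = i + 1
--         yield temp_instructions
-- ===== SOURCE B (Python) =====
-- def generate_data(instructions):
--     for i, item in enumerate(instructions):
--         if item[:3] in ["nop", "jmp"]:
--             temp = list(instructions)
--             if "nop" in temp[i]:
--                 temp[i] = "jmp" + temp[i][3:]
--             else:
--                 temp[i] = "nop" + temp[i][3:]
--             yield temp
-- ===== Notes on version B (the rewrite author's own statement) =====
-- stated objective: simpler
-- what changed: B is one flat enumerate pass that yields a flipped copy at each nop/jmp position, removing A's pre-count of flippable instructions, its round loop over that count, and the inner rescan-from-index search entirely.
import Mathlib
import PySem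

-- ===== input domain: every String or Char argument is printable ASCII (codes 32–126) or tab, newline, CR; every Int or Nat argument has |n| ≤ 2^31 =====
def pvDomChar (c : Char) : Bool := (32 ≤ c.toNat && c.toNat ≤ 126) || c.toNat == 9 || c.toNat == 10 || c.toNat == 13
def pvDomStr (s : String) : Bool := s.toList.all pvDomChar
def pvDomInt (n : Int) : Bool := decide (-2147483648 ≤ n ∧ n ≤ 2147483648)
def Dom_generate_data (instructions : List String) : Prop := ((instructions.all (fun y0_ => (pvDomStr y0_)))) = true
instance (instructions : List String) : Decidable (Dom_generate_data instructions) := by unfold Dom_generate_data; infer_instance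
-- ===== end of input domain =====

-- B replaces A's count/round-loop/rescan-with-index structure by one flat enumerate pass (simpler).

-- ===== PORT A =====
-- x[:3] in ["nop", "jmp"]
def pvPred (x : String) : Bool :=
  let p := PySem.Str.slice x none (some 3)
  p == "nop" || p == "jmp"

-- if "nop" in s: "jmp" + s[3:] else "nop" + s[3:]   (str concat is exact code-point concat)
def pvFlip (s : String) : String :=
  if PySem.Str.isIn "nop" s
  then String.ofList ("jmp".toList ++ (PySem.Str.slice s (some 3) none).toList)
  else String.ofList ("nop".toList ++ (PySem.Str.slice s (some 3) none).toList)

-- `for i, item in enumerate(instructions): if i >= index and item[:3] in [...]: break`;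
-- on exhaustion without break the Python loop variable i keeps its last value (i - 1 here);
-- that branch is unreachable from generate_data's calls.
def pvFindB (index : Int) (i : Int) : List String → Int
  | [] => i - 1
  | x :: rest => if i ≥ index ∧ pvPred x then i else pvFindB index (i + 1) rest

-- `for round in range(count_nop_jmp)` carrying `index`; temp is an unmutated copy of
-- instructions, temp_instructions a fresh copy per round.  The picked i is always a valid
-- nonnegative index whenever this body runs, so temp[i] reads/writes are pyGetD / set.
def pvALoop (instructions : List String) : Nat → Int → List (List String)
  | 0, _ => []
  | n + 1, index =>
    let i := pvFindB index 0 instructions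
    let temp_instructions :=
      instructions.set i.toNat (pvFlip (PySem.List.pyGetD instructions i ""))
    temp_instructions :: pvALoop instructions n (i + 1)

def generate_data (instructions : List String) : List (List String) :=
  let count_nop_jmp :=
    ((instructions.filter (fun x => pvPred x)).map (fun _ => (1 : Int))).sum
  pvALoop instructions count_nop_jmp.toNat 0

-- ===== PORT B =====
-- one flat pass: for i, item in enumerate(instructions): if item[:3] in [...]: yield flipped copy
def generate_data_alt (instructions : List String) : List (List String) :=
  (PySem.List.enumerate instructions).foldl
    (fun acc p =>
      if pvPred p.2 then
        acc ++ [instructions.set p.1.toNat (pvFlip (PySem.List.pyGetD instructions p.1 ""))]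
      else acc) []

-- ===== PRECONDITION & SPEC =====
def Spec_generate_data (instructions : List String) (out : List (List String)) : Prop := out = generate_data_alt instructions
instance (instructions : List String) (out : List (List String)) : Decidable (Spec_generate_data instructions out) := by unfold Spec_generate_data; infer_instance

-- ===== CLAIM (what is proved, stated in full; the proofs are below) =====
def Claim_equal_generate_data : Prop := ∀ (instructions : List String), Dom_generate_data instructions → Spec_generate_data instructions (generate_data instructions)

-- ===== LEMMAS AND PROOFS =====

-- the (absolute) indices of flippable instructions, counting from s
def pvQ : List String → Int → List Int
  | [], _ => []
  | x :: r, s => if pvPred x then s :: pvQ r (s + 1) else pvQ r (s + 1)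

-- the variant produced at index i
def pvG (L : List String) (i : Int) : List String :=
  L.set i.toNat (pvFlip (PySem.List.pyGetD L i ""))

theorem pvQ_ge : ∀ (l : List String) (s i : Int), i ∈ pvQ l s → s ≤ i := by
  intro l
  induction l with
  | nil => intro s i h; simp [pvQ] at h
  | cons x r ih =>
    intro s i h
    simp only [pvQ] at h
    by_cases hx : pvPred x
    · simp [hx] at h
      rcases h with h | h
      · omega
      · have := ih (s + 1) i h; omega
    · simp [hx] at h
      have := ih (s + 1) i h; omega

theorem pvQ_pairwise : ∀ (l : List String) (s : Int), (pvQ l s).Pairwise (· < ·) := by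
  intro l
  induction l with
  | nil => intro s; simp [pvQ]
  | cons x r ih =>
    intro s
    simp only [pvQ]
    by_cases hx : pvPred x
    · simp only [hx, if_true]
      refine List.pairwise_cons.mpr ⟨?_, ih (s + 1)⟩
      intro j hj
      have := pvQ_ge r (s + 1) j hj; omega
    · simp only [hx]; exact ih (s + 1)

theorem pvCnt_eq : ∀ (l : List String) (s : Int),
    ((l.filter (fun x => pvPred x)).map (fun _ => (1 : Int))).sum = (pvQ l s).length := by
  intro l
  induction l with
  | nil => intro s; simp [pvQ]
  | cons x r ih =>
    intro s
    by_cases hx : pvPred x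
    · have h := ih (s + 1); simp at h ⊢; simp [pvQ, hx]; omega
    · have h := ih (s + 1); simp at h ⊢; simp [pvQ, hx]; omega

theorem pvFindB_eq : ∀ (l : List String) (s ix i : Int) (rest : List Int),
    (pvQ l s).filter (fun j => decide (ix ≤ j)) = i :: rest → pvFindB ix s l = i := by
  intro l
  induction l with
  | nil => intro s ix i rest h; simp [pvQ] at h
  | cons x r ih =>
    intro s ix i rest h
    simp only [pvQ] at h
    simp only [pvFindB]
    by_cases hx : pvPred x
    · simp only [hx, if_true] at h
      by_cases hle : ix ≤ s
      · simp only [List.filter_cons, hle, if_pos, decide_true] at h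
        simp only [ge_iff_le, hle, hx, and_true, if_true]
        exact (List.cons.injEq _ _ _ _ ▸ h).1
      · simp only [List.filter_cons, decide_eq_true_eq] at h
        rw [if_neg (by simpa using hle)] at h
        have : ¬ (s ≥ ix ∧ pvPred x = true) := by
          intro hc; exact hle hc.1
        rw [if_neg this]
        exact ih (s + 1) ix i rest h
    · simp only [hx] at h
      have : ¬ (s ≥ ix ∧ pvPred x = true) := by
        intro hc; exact hx hc.2
      rw [if_neg this]
      exact ih (s + 1) ix i rest h

theorem pvFilter_succ : ∀ (q : List Int), q.Pairwise (· < ·) →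
    ∀ (ix i : Int) (rest : List Int),
    q.filter (fun j => decide (ix ≤ j)) = i :: rest →
    q.filter (fun j => decide (i + 1 ≤ j)) = rest := by
  intro q
  induction q with
  | nil => intro _ ix i rest h; simp at h
  | cons a q' ih =>
    intro hp ix i rest h
    have hp' := List.pairwise_cons.mp hp
    by_cases hle : ix ≤ a
    · simp only [List.filter_cons, hle, decide_true, if_pos] at h
      have ha : a = i := (List.cons.injEq _ _ _ _ ▸ h).1
      have hr : q'.filter (fun j => decide (ix ≤ j)) = rest := (List.cons.injEq _ _ _ _ ▸ h).2
      subst ha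
      have hall : ∀ j ∈ q', a + 1 ≤ j := by intro j hj; have := hp'.1 j hj; omega
      rw [List.filter_cons]
      rw [if_neg (by simp)]
      rw [List.filter_eq_self.mpr (by intro j hj; simpa using hall j hj)]
      rw [← hr, List.filter_eq_self.mpr (by intro j hj; have := hall j hj; simp; omega)]
    · simp only [List.filter_cons, decide_eq_true_eq] at h
      rw [if_neg (by simpa using hle)] at h
      have hi : ix ≤ i := by
        have : i ∈ q'.filter (fun j => decide (ix ≤ j)) := by rw [h]; exact List.mem_cons_self
        simpa using (List.of_mem_filter this)
      rw [List.filter_cons, if_neg (by simp; omega)]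
      exact ih hp'.2 ix i rest h

theorem pvFoldB : ∀ (L sub : List String) (s : Int) (acc : List (List String)),
    (PySem.List.enumerate sub s).foldl
      (fun acc p =>
        if pvPred p.2 then
          acc ++ [L.set p.1.toNat (pvFlip (PySem.List.pyGetD L p.1 ""))]
        else acc) acc
    = acc ++ (pvQ sub s).map (pvG L) := by
  intro L sub
  induction sub with
  | nil => intro s acc; simp [PySem.List.enumerate_nil, pvQ]
  | cons x r ih =>
    intro s acc
    rw [PySem.List.enumerate_cons, List.foldl_cons]
    by_cases hx : pvPred x
    · simp only [hx, if_true, pvQ, List.map_cons, ih]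
      simp [pvG, List.append_assoc]
    · simp [hx, pvQ, ih]

theorem pvLoop_eq : ∀ (L : List String) (c : Nat) (ix : Int),
    ((pvQ L 0).filter (fun j => decide (ix ≤ j))).length = c →
    pvALoop L c ix = ((pvQ L 0).filter (fun j => decide (ix ≤ j))).map (pvG L) := by
  intro L c
  induction c with
  | zero =>
    intro ix h
    rw [List.length_eq_zero_iff] at h
    simp [pvALoop, h]
  | succ n ih =>
    intro ix h
    cases hq : (pvQ L 0).filter (fun j => decide (ix ≤ j)) with
    | nil => rw [hq] at h; simp at h
    | cons i rest =>
      have hfind : pvFindB ix 0 L = i := pvFindB_eq L 0 ix i rest hq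
      have hrest : (pvQ L 0).filter (fun j => decide (i + 1 ≤ j)) = rest :=
        pvFilter_succ (pvQ L 0) (pvQ_pairwise L 0) ix i rest hq
      have hlen : rest.length = n := by rw [hq] at h; simpa using h
      simp only [pvALoop, hfind]
      rw [ih (i + 1) (by rw [hrest]; exact hlen), hrest, List.map_cons]
      rfl

theorem pvFilter_zero (L : List String) :
    (pvQ L 0).filter (fun j => decide ((0 : Int) ≤ j)) = pvQ L 0 := by
  apply List.filter_eq_self.mpr
  intro j hj
  simpa using pvQ_ge L 0 j hj

-- ===== VERDICT (by name: the statement is the Claim_ definition above) =====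
theorem generate_data_spec : Claim_equal_generate_data := by
  intro L _
  unfold Spec_generate_data generate_data generate_data_alt
  rw [pvFoldB L L 0 []]
  have hc : ((L.filter (fun x => pvPred x)).map (fun _ => (1 : Int))).sum = (pvQ L 0).length :=
    pvCnt_eq L 0
  rw [hc]
  simp only [Int.toNat_natCast, List.nil_append]
  rw [pvLoop_eq L (pvQ L 0).length 0 (by rw [pvFilter_zero]), pvFilter_zero]
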